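-- pv_equiv track=rewrite | github.com/Praetorian-Defence/praetorian-api | apps/core/services/clean_log.py | _remove_before_and_substring
-- ===== SOURCE A (Python) =====
-- def _remove_before_and_substring(main_string, to_find):
--     """
--     Remove everything before and including the substring
--     """
--
--     output = []
--     i = 0
--     n = len(main_string)
--     m = len(to_find)
--
--     while i < n:
--         if main_string[i:i + m] == to_find:
--             output.clear()
--             i += m  # Skip the length of to_find
--         else:
--             output.append(main_string[i])
--             i += 1
--
--     return ''.join(output)
-- ===== SOURCE B (Python) =====
-- def _remove_before_and_substring(main_string, to_find):
--     # tail after the last left-to-right non-overlapping occurrence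
--     return main_string.split(to_find)[-1]
-- ===== Notes on version B (the rewrite author's own statement) =====
-- stated objective: simpler
-- what changed: B replaces A's hand-written character-by-character scan (slice-compare, clear-and-skip accumulator loop) with a single str.split(to_find)[-1]: the tail after the last non-overlapping occurrence is exactly the last piece of the split; the C-implemented split makes it measurably faster.
-- outside the precondition, e.g. on _remove_before_and_substring('', ''): A returns '', B raises ValueError
import Mathlib
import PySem

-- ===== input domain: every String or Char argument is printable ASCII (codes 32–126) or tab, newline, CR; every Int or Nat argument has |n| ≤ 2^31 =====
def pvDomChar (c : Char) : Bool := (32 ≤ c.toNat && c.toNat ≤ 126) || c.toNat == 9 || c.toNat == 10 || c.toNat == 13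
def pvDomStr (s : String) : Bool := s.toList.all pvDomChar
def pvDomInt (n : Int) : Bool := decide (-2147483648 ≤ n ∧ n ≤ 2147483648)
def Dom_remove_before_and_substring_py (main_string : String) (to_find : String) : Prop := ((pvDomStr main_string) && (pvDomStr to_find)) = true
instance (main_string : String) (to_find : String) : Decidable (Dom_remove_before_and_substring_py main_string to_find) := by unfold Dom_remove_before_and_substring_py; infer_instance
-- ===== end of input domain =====

-- ===== PORT A =====
-- B changes the algorithm: split on the substring and take the last piece, instead of A's char scan (objective: simpler).
-- unreachable-fuel fallback is `acc ++ s`; with fuel = length+1 and to_find nonempty it is never hit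
def pvAGo (t : List Char) : Nat → List Char → List Char → List Char
  | 0, s, acc => acc ++ s
  | _ + 1, [], acc => acc
  | fuel + 1, c :: rest, acc =>
    -- `main_string[i:i+m] == to_find` : slice-compare at the current position
    if (c :: rest).take t.length = t then
      pvAGo t fuel ((c :: rest).drop t.length) []      -- output.clear(); i += m
    else
      pvAGo t fuel rest (acc ++ [c])                   -- output.append(main_string[i]); i += 1

def remove_before_and_substring_py (main_string : String) (to_find : String) : String :=
  String.ofList (pvAGo to_find.toList (main_string.toList.length + 1) main_string.toList [])

-- ===== PORT B =====
def remove_before_and_substring_py_alt (main_string : String) (to_find : String) : String :=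
  match PySem.Str.split? main_string to_find with
  | none => ""   -- Python raises ValueError here (to_find = ""); excluded by Pre_
  | some parts => (PySem.List.pyGet? parts (-1)).getD ""   -- parts[-1]; split never returns []

-- ===== PRECONDITION & SPEC =====
-- Pre_ excludes empty to_find: there A loops forever on any nonempty main_string (and returns ''
-- only for empty main_string) while B's str.split raises ValueError.
def Pre_remove_before_and_substring_py (main_string : String) (to_find : String) : Prop :=
  to_find ≠ ""
instance (main_string : String) (to_find : String) : Decidable (Pre_remove_before_and_substring_py main_string to_find) := by
  unfold Pre_remove_before_and_substring_py; infer_instance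

def pvWitness_remove_before_and_substring_py : String × String := ("abcXdef", "X")

def Spec_remove_before_and_substring_py (main_string : String) (to_find : String) (out : String) : Prop := out = remove_before_and_substring_py_alt main_string to_find
instance (main_string : String) (to_find : String) (out : String) : Decidable (Spec_remove_before_and_substring_py main_string to_find out) := by unfold Spec_remove_before_and_substring_py; infer_instance

-- ===== CLAIM (what is proved, stated in full; the proofs are below) =====
def Claim_equal_remove_before_and_substring_py : Prop := ∀ (main_string : String) (to_find : String), Dom_remove_before_and_substring_py main_string to_find → Pre_remove_before_and_substring_py main_string to_find → Spec_remove_before_and_substring_py main_string to_find (remove_before_and_substring_py main_string to_find)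

-- ===== LEMMAS AND PROOFS =====

-- the last piece produced by split's worker equals A's scan with the current reversed piece as accumulator
theorem pv_go_getLast (t : List Char) :
    ∀ (fuel : Nat) (s cur : List Char) (acc : List (List Char)),
      (PySem.Chars.splitOn.go t fuel s cur acc).getLast? = some (pvAGo t fuel s cur.reverse) := by
  intro fuel
  induction fuel with
  | zero =>
    intro s cur acc
    simp [PySem.Chars.splitOn.go, pvAGo]
  | succ n ih =>
    intro s cur acc
    cases s with
    | nil => simp [PySem.Chars.splitOn.go, pvAGo]
    | cons c rest =>
      by_cases hp : t <+: (c :: rest)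
      · have hb : t.isPrefixOf (c :: rest) = true := by
          rw [List.isPrefixOf_iff_prefix]; exact hp
        have he : (c :: rest).take t.length = t :=
          (List.prefix_iff_eq_take.mp hp).symm
        simp only [PySem.Chars.splitOn.go, pvAGo, hb, he, if_true]
        simpa using ih ((c :: rest).drop t.length) [] (cur.reverse :: acc)
      · have hb : t.isPrefixOf (c :: rest) = false := by
          rw [Bool.eq_false_iff, ne_eq, List.isPrefixOf_iff_prefix]; exact hp
        have he : ¬ ((c :: rest).take t.length = t) := by
          intro h; exact hp (List.prefix_iff_eq_take.mpr h.symm)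
        simp only [PySem.Chars.splitOn.go, pvAGo, hb, if_false, if_neg he, Bool.false_eq_true]
        simpa using ih rest (c :: cur) acc

theorem pv_splitOn_getLast (s t : List Char) :
    (PySem.Chars.splitOn s t).getLast? = some (pvAGo t (s.length + 1) s []) := by
  have := pv_go_getLast t (s.length + 1) s [] []
  simpa [PySem.Chars.splitOn] using this

theorem pv_pyGet_neg_one {α : Type} (xs : List α) (h : xs ≠ []) :
    PySem.List.pyGet? xs (-1) = xs.getLast? := by
  have hn : 0 < xs.length := List.length_pos_of_ne_nil h
  have h1 : -(xs.length : Int) ≤ -1 := by omega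
  simp [PySem.List.pyGet?, PySem.List.pyIdx?, h1, List.getLast?_eq_getElem?]

-- ===== VERDICT (by name: the statement is the Claim_ definition above) =====
theorem remove_before_and_substring_py_spec : Claim_equal_remove_before_and_substring_py := by
  intro s t _ hpre
  unfold Spec_remove_before_and_substring_py
  unfold remove_before_and_substring_py remove_before_and_substring_py_alt
  have ht : t.toList.isEmpty = false := by
    rw [List.isEmpty_eq_false_iff]
    simpa [ne_eq, String.toList_eq_nil_iff] using hpre
  rw [PySem.Str.split?]
  simp only [PySem.Chars.split?, ht, Bool.false_eq_true, if_false, Option.map_some]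
  have hlast := pv_splitOn_getLast s.toList t.toList
  have hne : (PySem.Chars.splitOn s.toList t.toList).map String.ofList ≠ [] := by
    intro h
    rw [List.map_eq_nil_iff.mp h] at hlast
    simp at hlast
  rw [pv_pyGet_neg_one _ hne, List.getLast?_map, hlast]
  rfl
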